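-- pv_equiv track=rewrite | github.com/Unagi-zoso/five-golds-in-a-day | out/production/five-golds-in-a-day/boj-7940.py | addSpaceBetweenNums
-- ===== SOURCE A (Python) =====
-- def addSpaceBetweenNums(str):
--     n_s = str[0]
--     for i in range(len(str)-1):
--         if str[i] != '+' and str[i] != '-' and str[i+1] != '+' and str[i+1] != '-':
--             n_s += (' ' + str[i+1])
--         else:
--             n_s += str[i+1]
--     return n_s
-- ===== SOURCE B (Python) =====
-- def addSpaceBetweenNums(str):
--     pieces = []
--     run = []
--     for c in str:
--         if c == '+' or c == '-':
--             if run: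
--                 pieces.append(' '.join(run))
--                 run = []
--             pieces.append(c)
--         else:
--             run.append(c)
--     if run:
--         pieces.append(' '.join(run))
--     return ''.join(pieces)
-- ===== Notes on version B (the rewrite author's own statement) =====
-- stated objective: alternative
-- what changed: Replaces the index-based adjacent-pair scan (str[i]/str[i+1] with a four-way operator test per pair, building the result by repeated string concatenation) by run-grouping: split the string into maximal runs of non-operator characters, space-join each run, and concatenate runs and operators in order.
import Mathlib
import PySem

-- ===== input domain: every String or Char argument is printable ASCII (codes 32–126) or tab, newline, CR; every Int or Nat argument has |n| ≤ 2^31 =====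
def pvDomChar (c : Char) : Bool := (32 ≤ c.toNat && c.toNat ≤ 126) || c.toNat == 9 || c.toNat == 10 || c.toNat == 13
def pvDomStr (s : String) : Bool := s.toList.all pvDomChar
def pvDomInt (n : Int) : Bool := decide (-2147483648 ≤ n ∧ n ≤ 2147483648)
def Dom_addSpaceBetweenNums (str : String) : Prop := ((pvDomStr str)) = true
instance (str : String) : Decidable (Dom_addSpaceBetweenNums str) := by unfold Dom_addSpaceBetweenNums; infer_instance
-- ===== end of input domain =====

-- B replaces A's adjacent-pair index scan by run-grouping (space-join maximal non-operator runs);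
-- equivalence is claimed on non-empty strings (A raises IndexError on "" via str[0]).

-- ===== PORT A =====
-- literal port: n_s = str[0]; then for i in range(len(str)-1) append ' '+str[i+1] or str[i+1]
def addSpaceBetweenNums (str : String) : String :=
  let l := str.toList
  let n_s : List Char := match PySem.List.pyGet? l 0 with
    | some c => [c]          -- str[0]; none = IndexError, excluded by Pre_
    | none => []
  let res := (PySem.List.pyRange 0 ((l.length : Int) - 1) 1).foldl (fun acc i =>
    let ci := PySem.List.pyGetD l i ' '
    let ci1 := PySem.List.pyGetD l (i + 1) ' '
    if ci ≠ '+' ∧ ci ≠ '-' ∧ ci1 ≠ '+' ∧ ci1 ≠ '-' then acc ++ [' ', ci1]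
    else acc ++ [ci1]) n_s
  String.ofList res

-- ===== PORT B =====
-- literal port of Source B: run/pieces loop; ' '.join(run) = intersperse ' ', ''.join = concatenation
def addSpaceBetweenNumsGo : List Char → List Char → List Char → List Char
  | run, pieces, [] => pieces ++ (if run.isEmpty then [] else run.intersperse ' ')
  | run, pieces, c :: rest =>
    if c == '+' || c == '-' then
      addSpaceBetweenNumsGo [] ((pieces ++ (if run.isEmpty then [] else run.intersperse ' ')) ++ [c]) rest
    else
      addSpaceBetweenNumsGo (run ++ [c]) pieces rest

def addSpaceBetweenNums_alt (str : String) : String :=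
  String.ofList (addSpaceBetweenNumsGo [] [] str.toList)

-- ===== PRECONDITION & SPEC =====
-- Pre_ excludes only the empty string, on which A raises IndexError (str[0]).
def Pre_addSpaceBetweenNums (str : String) : Prop := str ≠ ""
instance (str : String) : Decidable (Pre_addSpaceBetweenNums str) := by
  unfold Pre_addSpaceBetweenNums; infer_instance

def pvWitness_addSpaceBetweenNums : String := "12+34"

def Spec_addSpaceBetweenNums (str : String) (out : String) : Prop := out = addSpaceBetweenNums_alt str
instance (str : String) (out : String) : Decidable (Spec_addSpaceBetweenNums str out) := by
  unfold Spec_addSpaceBetweenNums; infer_instance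

-- ===== CLAIM (what is proved, stated in full; the proofs are below) =====
def Claim_equal_addSpaceBetweenNums : Prop := ∀ (str : String), Dom_addSpaceBetweenNums str → Pre_addSpaceBetweenNums str → Spec_addSpaceBetweenNums str (addSpaceBetweenNums str)

-- ===== LEMMAS AND PROOFS =====

-- common specification: pvP p cs = the characters A appends after position of p, given previous char p
def pvNonOp (c : Char) : Bool := !(c == '+' || c == '-')

def pvP : Char → List Char → List Char
  | _, [] => []
  | p, d :: t => (if pvNonOp p && pvNonOp d then [' ', d] else [d]) ++ pvP d t

theorem pvP_cond (p d : Char) :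
    (if p ≠ '+' ∧ p ≠ '-' ∧ d ≠ '+' ∧ d ≠ '-' then ([' ', d] : List Char) else [d])
      = (if pvNonOp p && pvNonOp d then [' ', d] else [d]) := by
  simp only [pvNonOp, Bool.and_eq_true, Bool.not_eq_true', Bool.or_eq_false_iff, beq_eq_false_iff_ne]
  split_ifs with h1 h2 h2 <;> simp_all

-- ----- A side -----
theorem foldA_zip (rest : List Char) : ∀ (c : Char) (acc : List Char),
    ((c :: rest).zip rest).foldl (fun acc (p : Char × Char) =>
        if p.1 ≠ '+' ∧ p.1 ≠ '-' ∧ p.2 ≠ '+' ∧ p.2 ≠ '-' then acc ++ [' ', p.2]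
        else acc ++ [p.2]) acc = acc ++ pvP c rest := by
  induction rest with
  | nil => intro c acc; simp [pvP]
  | cons d t ih =>
    intro c acc
    simp only [List.zip_cons_cons, List.foldl_cons, ih d]
    rw [pvP, ← pvP_cond]
    split_ifs <;> simp [List.append_assoc]

theorem A_fold (c : Char) (rest : List Char) :
    (PySem.List.pyRange 0 (((c :: rest).length : Int) - 1) 1).foldl (fun acc i =>
      let ci := PySem.List.pyGetD (c :: rest) i ' '
      let ci1 := PySem.List.pyGetD (c :: rest) (i + 1) ' '
      if ci ≠ '+' ∧ ci ≠ '-' ∧ ci1 ≠ '+' ∧ ci1 ≠ '-' then acc ++ [' ', ci1]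
      else acc ++ [ci1]) [c] = c :: pvP c rest := by
  have hlen : ((c :: rest).length : Int) - 1 = ((((c :: rest).zip rest).length : Int)) := by
    simp
  rw [hlen]
  rw [PySem.List.foldl_congr_mem _ _ (fun acc i =>
    (fun (a : List Char) (p : Char × Char) =>
      if p.1 ≠ '+' ∧ p.1 ≠ '-' ∧ p.2 ≠ '+' ∧ p.2 ≠ '-' then a ++ [' ', p.2] else a ++ [p.2])
      acc (PySem.List.pyGetD ((c :: rest).zip rest) i (' ', ' ')))
    [c]
    (by
      intro acc i hi
      rw [PySem.List.mem_pyRange_one] at hi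
      obtain ⟨h0, h2⟩ := hi
      have h1 : i.toNat < rest.length := by
        have : ((c :: rest).zip rest).length = rest.length := by simp
        omega
      dsimp only
      rw [PySem.List.pyGetD_eq_getElem (c :: rest) ' ' h0 (by simp; omega),
          PySem.List.pyGetD_eq_getElem (c :: rest) ' ' (by omega) (by simp; omega),
          PySem.List.pyGetD_eq_getElem ((c :: rest).zip rest) (' ', ' ') h0 (by simp; omega)]
      have hnat : (i + 1).toNat = i.toNat + 1 := by omega
      simp only [hnat, List.getElem_cons_succ, List.getElem_zip])]
  rw [PySem.List.foldl_pyRange_zero_pyGetD' ((c :: rest).zip rest) (' ', ' ')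
    (fun (a : List Char) (p : Char × Char) =>
      if p.1 ≠ '+' ∧ p.1 ≠ '-' ∧ p.2 ≠ '+' ∧ p.2 ≠ '-' then a ++ [' ', p.2] else a ++ [p.2]) [c]]
  rw [foldA_zip rest c [c]]
  rfl

theorem A_eq_list (c : Char) (rest : List Char) :
    addSpaceBetweenNums (String.ofList (c :: rest)) = String.ofList (c :: pvP c rest) := by
  unfold addSpaceBetweenNums
  simp only [String.toList_ofList, PySem.List.pyGet?_zero_cons]
  rw [A_fold]

-- ----- B side -----
theorem go_pieces (cs : List Char) : ∀ run pieces,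
    addSpaceBetweenNumsGo run pieces cs = pieces ++ addSpaceBetweenNumsGo run [] cs := by
  induction cs with
  | nil => intro run pieces; simp [addSpaceBetweenNumsGo]
  | cons c t ih =>
    intro run pieces
    by_cases h : (c == '+' || c == '-') = true
    · simp only [addSpaceBetweenNumsGo, h, if_pos]
      rw [ih [] ((pieces ++ _) ++ [c]), ih [] ((([] : List Char) ++ _) ++ [c])]
      simp
    · simp only [addSpaceBetweenNumsGo, h, Bool.false_eq_true, if_false]
      exact ih (run ++ [c]) pieces

theorem intersperse_append (run : List Char) (d : Char) (h : run ≠ []) :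
    (run ++ [d]).intersperse ' ' = run.intersperse ' ' ++ [' ', d] := by
  induction run with
  | nil => simp at h
  | cons a t ih =>
    cases t with
    | nil => simp [List.intersperse]
    | cons b u =>
      simp only [List.cons_append, List.intersperse_cons₂]
      rw [show (b :: u) ++ [d] = b :: (u ++ [d]) from rfl] at *
      simp [ih (by simp)]

theorem go_main (cs : List Char) : ∀ (run : List Char) (p : Char),
    (run = [] → pvNonOp p = false) →
    (run ≠ [] → run.getLast? = some p ∧ pvNonOp p = true) →
    addSpaceBetweenNumsGo run [] cs
      = (if run.isEmpty then [] else run.intersperse ' ') ++ pvP p cs := by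
  induction cs with
  | nil => intro run p _ _; simp [addSpaceBetweenNumsGo, pvP]
  | cons d t ih =>
    intro run p h0 h1
    by_cases hd : (d == '+' || d == '-') = true
    · have hdop : pvNonOp d = false := by simp [pvNonOp, hd]
      simp only [addSpaceBetweenNumsGo, hd, if_pos]
      rw [go_pieces, ih [] d (fun _ => hdop) (fun h => absurd rfl h)]
      simp [pvP, hdop, List.append_assoc]
    · have hdf : (d == '+' || d == '-') = false := eq_false_of_ne_true hd
      have hdn : pvNonOp d = true := by simp [pvNonOp, hdf]
      simp only [addSpaceBetweenNumsGo, hdf, Bool.false_eq_true, if_false]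
      rw [ih (run ++ [d]) d (by simp) (fun _ => ⟨List.getLast?_concat, hdn⟩)]
      by_cases hr : run = []
      · subst hr
        have hpf := h0 rfl
        rw [pvP]
        simp [hpf]
      · obtain ⟨hlast, hpn⟩ := h1 hr
        rw [pvP, intersperse_append run d hr]
        have he1 : (run ++ [d]).isEmpty = false := by simp
        have he2 : run.isEmpty = false := by
          cases run with
          | nil => exact absurd rfl hr
          | cons a t => rfl
        simp [he1, he2, hpn, hdn, List.append_assoc]

theorem B_eq_list (c : Char) (rest : List Char) :
    addSpaceBetweenNumsGo [] [] (c :: rest) = c :: pvP c rest := by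
  by_cases hc : (c == '+' || c == '-') = true
  · have hcop : pvNonOp c = false := by simp [pvNonOp, hc]
    simp only [addSpaceBetweenNumsGo, hc, if_pos]
    rw [go_pieces, go_main rest [] c (fun _ => hcop) (fun h => absurd rfl h)]
    simp
  · have hcf : (c == '+' || c == '-') = false := eq_false_of_ne_true hc
    have hcn : pvNonOp c = true := by simp [pvNonOp, hcf]
    simp only [addSpaceBetweenNumsGo, hcf, Bool.false_eq_true, if_false, List.nil_append]
    rw [go_main rest [c] c (by simp) (fun _ => ⟨rfl, hcn⟩)]
    simp [List.intersperse]

-- ===== VERDICT (by name: the statement is the Claim_ definition above) =====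
theorem addSpaceBetweenNums_spec : Claim_equal_addSpaceBetweenNums := by
  intro str _ hpre
  have hne : str.toList ≠ [] := by
    intro h
    exact hpre (by rw [← String.ofList_toList (s := str), h])
  obtain ⟨c, rest, hcr⟩ := List.exists_cons_of_ne_nil hne
  have hs : str = String.ofList (c :: rest) := by
    rw [← hcr, String.ofList_toList]
  unfold Spec_addSpaceBetweenNums
  rw [hs, A_eq_list c rest]
  unfold addSpaceBetweenNums_alt
  rw [String.toList_ofList, B_eq_list]
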